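-- pv_equiv track=rewrite | github.com/jaiwargacki/ClearDarkSkyDiscordBot | src/clearDarkSkyHelpers.py | temperatureToTextRange
-- ===== SOURCE A (Python) =====
-- def temperatureToTextRange(temp):
--     """ Convert temperature to text range.
--     Parameters:
--         temp (int): The temperature to convert to text range.
--     Returns:
--         str: The text range of the temperature.
--     """
--     if temp < -40:
--         return '< -40F'
--     mins = [-40, -30, -21, -12, -3, 5, 14, 23, 32, 41, 50, 59, 68, 77, 86, 95, 104, 113]
--     for i in range(1, len(mins)):
--         if temp < mins[i]:
--             return f'{mins[i-1]}F to {mins[i]}F'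
--     return '> 113F'
-- ===== SOURCE B (Python) =====
-- def temperatureToTextRange(temp):
--     """ Convert temperature to text range.
--     The thresholds are two arithmetic progressions of step 9 (below -3 and
--     from 5 up), joined by the 8-wide bucket -3F..5F, so the bucket is
--     computed arithmetically instead of scanning the threshold list. """
--     if temp < -40:
--         return '< -40F'
--     if temp >= 113:
--         return '> 113F'
--     if temp < -30:
--         return '-40F to -30F'
--     if temp < -3:
--         lo = -30 + 9 * ((temp + 30) // 9)
--     elif temp < 5:
--         return '-3F to 5F'
--     else:
--         lo = 5 + 9 * ((temp - 5) // 9)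
--     return f'{lo}F to {lo + 9}F'
-- ===== Notes on version B (the rewrite author's own statement) =====
-- stated objective: alternative
-- what changed: B replaces A's linear scan of the fixed threshold list with a closed-form arithmetic bucket computation, exploiting that the thresholds form two arithmetic progressions of common difference nine joined by one narrower middle bucket.
import Mathlib
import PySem

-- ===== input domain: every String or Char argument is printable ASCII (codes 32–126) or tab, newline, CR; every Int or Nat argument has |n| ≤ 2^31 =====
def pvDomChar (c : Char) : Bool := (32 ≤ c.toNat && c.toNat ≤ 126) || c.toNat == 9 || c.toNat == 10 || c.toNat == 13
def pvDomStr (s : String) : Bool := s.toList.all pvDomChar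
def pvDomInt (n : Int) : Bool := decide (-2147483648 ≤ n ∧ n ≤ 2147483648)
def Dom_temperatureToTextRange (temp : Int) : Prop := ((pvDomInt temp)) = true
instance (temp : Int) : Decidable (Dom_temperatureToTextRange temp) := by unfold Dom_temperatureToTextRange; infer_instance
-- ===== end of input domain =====

-- B replaces A's linear scan of the threshold list by a closed-form arithmetic
-- bucket computation (objective: alternative / idiomatic arithmetic form).

-- ===== PORT A =====
-- the loop 'for i in range(1, len(mins)): if temp < mins[i]: return …';
-- recursion over the index list produced by range(1, len(mins)).
-- The pyGet? lookups are always in range (1 ≤ i < len(mins)), so the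
-- final catch-all "" is unreachable.
def temperatureToTextRange_loop (temp : Int) (mins : List Int) : List Int → String
  | [] => "> 113F"
  | i :: rest =>
    match PySem.List.pyGet? mins i, PySem.List.pyGet? mins (i - 1) with
    | some mi, some mprev =>
      if temp < mi then PySem.Int.toStr mprev ++ "F to " ++ PySem.Int.toStr mi ++ "F"
      else temperatureToTextRange_loop temp mins rest
    | _, _ => ""

def temperatureToTextRange (temp : Int) : String :=
  if temp < -40 then "< -40F"
  else
    let mins : List Int := [-40, -30, -21, -12, -3, 5, 14, 23, 32, 41, 50, 59, 68, 77, 86, 95, 104, 113]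
    temperatureToTextRange_loop temp mins (PySem.List.pyRange 1 (PySem.List.len mins) 1)

-- ===== PORT B =====
def temperatureToTextRange_alt (temp : Int) : String :=
  if temp < -40 then "< -40F"
  else if 113 ≤ temp then "> 113F"
  else if temp < -30 then "-40F to -30F"
  else if temp < -3 then
    let lo := -30 + 9 * PySem.Int.floordiv (temp + 30) 9
    PySem.Int.toStr lo ++ "F to " ++ PySem.Int.toStr (lo + 9) ++ "F"
  else if temp < 5 then "-3F to 5F"
  else
    let lo := 5 + 9 * PySem.Int.floordiv (temp - 5) 9
    PySem.Int.toStr lo ++ "F to " ++ PySem.Int.toStr (lo + 9) ++ "F"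

-- ===== PRECONDITION & SPEC =====
def Spec_temperatureToTextRange (temp : Int) (out : String) : Prop := out = temperatureToTextRange_alt temp
instance (temp : Int) (out : String) : Decidable (Spec_temperatureToTextRange temp out) := by unfold Spec_temperatureToTextRange; infer_instance

-- ===== CLAIM (what is proved, stated in full; the proofs are below) =====
def Claim_equal_temperatureToTextRange : Prop := ∀ (temp : Int), Dom_temperatureToTextRange temp → Spec_temperatureToTextRange temp (temperatureToTextRange temp)

-- ===== LEMMAS AND PROOFS =====

-- A's loop falls through to '> 113F' when every threshold is ≤ temp
theorem tttr_loop_ge (temp : Int) (mins : List Int) (hall : ∀ x ∈ mins, x ≤ temp) :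
    ∀ idxs : List Int,
      (∀ i ∈ idxs, (PySem.List.pyGet? mins i).isSome ∧ (PySem.List.pyGet? mins (i - 1)).isSome) →
      temperatureToTextRange_loop temp mins idxs = "> 113F" := by
  intro idxs
  induction idxs with
  | nil => intro _; rfl
  | cons i rest ih =>
    intro hin
    obtain ⟨h1, h2⟩ := hin i List.mem_cons_self
    obtain ⟨a, ha⟩ := Option.isSome_iff_exists.mp h1
    obtain ⟨b, hb⟩ := Option.isSome_iff_exists.mp h2
    have hna : ¬ temp < a := by
      have := hall a (PySem.List.mem_of_pyGet?_eq_some _ ha)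
      omega
    simp only [temperatureToTextRange_loop, ha, hb, if_neg hna]
    exact ih (fun j hj => hin j (List.mem_cons_of_mem i hj))

theorem tttr_eq (temp : Int) : temperatureToTextRange temp = temperatureToTextRange_alt temp := by
  by_cases h1 : temp < -40
  · simp [temperatureToTextRange, temperatureToTextRange_alt, h1]
  · by_cases h2 : temp < 113
    · have hlb : -40 ≤ temp := by omega
      have hub : temp ≤ 112 := by omega
      interval_cases temp <;> decide
    · -- temp ≥ 113: the loop falls through every threshold; B's second branch fires
      have h3 : (113:Int) ≤ temp := by omega
      rw [temperatureToTextRange, if_neg h1, temperatureToTextRange_alt, if_neg h1, if_pos h3]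
      show temperatureToTextRange_loop temp [-40, -30, -21, -12, -3, 5, 14, 23, 32, 41, 50, 59, 68, 77, 86, 95, 104, 113]
        (PySem.List.pyRange 1 (PySem.List.len ([-40, -30, -21, -12, -3, 5, 14, 23, 32, 41, 50, 59, 68, 77, 86, 95, 104, 113] : List Int)) 1) = "> 113F"
      rw [show PySem.List.pyRange 1 (PySem.List.len ([-40, -30, -21, -12, -3, 5, 14, 23, 32, 41, 50, 59, 68, 77, 86, 95, 104, 113] : List Int)) 1
            = [1,2,3,4,5,6,7,8,9,10,11,12,13,14,15,16,17] from by decide]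
      apply tttr_loop_ge
      · intro x hx
        fin_cases hx <;> omega
      · decide

-- ===== VERDICT (by name: the statement is the Claim_ definition above) =====
theorem temperatureToTextRange_spec : Claim_equal_temperatureToTextRange := by
  intro temp _
  exact tttr_eq temp
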